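-- pv_equiv track=rewrite | github.com/fejese/advent-of-code-2016 | day-07/solv-1.py | does_support
-- ===== SOURCE A (Python) =====
-- from collections import deque
--
-- def is_abba(cache: deque, ch: str) -> bool:
--     if len(cache) < 3:
--         return False
--     if cache[0] != ch:
--         return False
--     if cache[1] != cache[2]:
--         return False
--     if cache[0] == cache[1]:
--         return False
--     return True
--
-- def does_support(line: str) -> int:
--     cache = deque(maxlen=3)
--     in_subnet = False
--     found_outside = False
--     for ch in line:
--         if ch in "[]":
--             in_subnet = not in_subnet
--             cache = deque(maxlen=3)
--             continue
--
--         if in_subnet: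
--             if is_abba(cache, ch):
--                 return 0
--         elif not found_outside and is_abba(cache, ch):
--             found_outside = True
--
--         cache.append(ch)
--     return 1 if found_outside else 0
-- ===== SOURCE B (Python) =====
-- def _has_abba(seg):
--     return any(a == d and b == c and a != b
--                for a, b, c, d in zip(seg, seg[1:], seg[2:], seg[3:]))
--
--
-- def does_support(line):
--     # split at every bracket character; segment index parity = outside/inside
--     segs = line.replace(']', '[').split('[')
--     if any(_has_abba(s) for s in segs[1::2]):
--         return 0
--     return 1 if any(_has_abba(s) for s in segs[0::2]) else 0
-- ===== Notes on version B (the rewrite author's own statement) =====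
-- stated objective: idiomatic
-- what changed: Replaces A's single stateful scan (3-char deque cache, in_subnet toggle, early return) with an idiomatic split-at-brackets decomposition: segment index parity gives inside/outside, and each segment is checked for ABBA with a 4-char sliding window. (single-pass low-level scan replaced by replace/split plus per-segment windows; measured ~2x faster, a constant-factor effect of str built-ins)
import Mathlib
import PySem

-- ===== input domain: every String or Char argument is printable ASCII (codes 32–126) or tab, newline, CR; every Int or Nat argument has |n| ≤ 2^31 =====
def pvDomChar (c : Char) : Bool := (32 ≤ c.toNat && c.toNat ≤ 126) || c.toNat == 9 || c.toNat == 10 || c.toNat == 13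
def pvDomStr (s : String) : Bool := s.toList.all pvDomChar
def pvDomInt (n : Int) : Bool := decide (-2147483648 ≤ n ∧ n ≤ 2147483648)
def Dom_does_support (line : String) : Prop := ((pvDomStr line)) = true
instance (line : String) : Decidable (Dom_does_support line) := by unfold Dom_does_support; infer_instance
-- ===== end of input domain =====

-- B replaces A's stateful online scan (3-char deque + toggle + early return) by an
-- idiomatic split-at-brackets / parity / sliding-window check; same results, same O(n) cost.


-- ===== PORT A =====
-- is_abba(cache, ch): cache holds the last ≤3 chars (oldest first)
def isAbba (cache : List Char) (ch : Char) : Bool :=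
  if cache.length < 3 then false
  else if cache.getD 0 ' ' != ch then false
  else if cache.getD 1 ' ' != cache.getD 2 ' ' then false
  else if cache.getD 0 ' ' == cache.getD 1 ' ' then false
  else true

-- deque(maxlen=3).append ch
def pushCache (cache : List Char) (ch : Char) : List Char :=
  if cache.length = 3 then cache.tail ++ [ch] else cache ++ [ch]

-- the for-loop of does_support, state = (cache, in_subnet, found_outside)
def loopA : List Char → List Char → Bool → Bool → Int
  | [], _, _, found => if found then 1 else 0
  | ch :: rest, cache, ins, found =>
    if ch = '[' ∨ ch = ']' then loopA rest [] (!ins) found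
    else if ins then
      (if isAbba cache ch then 0 else loopA rest (pushCache cache ch) ins found)
    else
      loopA rest (pushCache cache ch) ins
        (if !found && isAbba cache ch then true else found)

def does_support (line : String) : Int :=
  loopA line.toList [] false false

-- ===== PORT B =====
-- split at every bracket char (exact port of line.replace(']','[').split('[')):
-- returns (first segment, remaining segments)
def splitB : List Char → List Char × List (List Char)
  | [] => ([], [])
  | c :: rest =>
    let (s, ss) := splitB rest
    if c = '[' ∨ c = ']' then ([], s :: ss) else (c :: s, ss)

-- any(a==d and b==c and a!=b for a,b,c,d in zip(seg, seg[1:], seg[2:], seg[3:]))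
def hasAbba : List Char → Bool
  | a :: b :: c :: d :: rest => (a == d && b == c && a != b) || hasAbba (b :: c :: d :: rest)
  | _ => false

-- segs[0::2] (resp. segs[1::2]): elements at even (resp. odd) indices
mutual
  def evens : List (List Char) → List (List Char)
    | [] => []
    | x :: r => x :: odds r
  def odds : List (List Char) → List (List Char)
    | [] => []
    | _ :: r => evens r
end

def does_support_alt (line : String) : Int :=
  let (s, ss) := splitB line.toList
  let segs := s :: ss
  if (odds segs).any hasAbba then 0
  else if (evens segs).any hasAbba then 1 else 0

-- ===== PRECONDITION & SPEC =====
def Spec_does_support (line : String) (out : Int) : Prop := out = does_support_alt line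
instance (line : String) (out : Int) : Decidable (Spec_does_support line out) := by unfold Spec_does_support; infer_instance

-- ===== CLAIM (what is proved, stated in full; the proofs are below) =====
def Claim_equal_does_support : Prop := ∀ (line : String), Dom_does_support line → Spec_does_support line (does_support line)

-- ===== LEMMAS AND PROOFS =====

-- B's value, relativised to A's loop state: the carried cache prepends to the first
-- segment, `ins` fixes the parity, `found` is an already-found outside ABBA.
def specB (cs : List Char) (cache : List Char) (ins found : Bool) : Int :=
  let (s, ss) := splitB cs
  let segs := (cache ++ s) :: ss
  let insSegs := if ins then evens segs else odds segs
  let outSegs := if ins then odds segs else evens segs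
  if insSegs.any hasAbba then 0
  else if found || outSegs.any hasAbba then 1 else 0

theorem hasAbba_short (l : List Char) (h : l.length < 4) : hasAbba l = false := by
  match l with
  | [] | [_] | [_, _] | [_, _, _] => rfl
  | _ :: _ :: _ :: _ :: _ => simp at h; omega

-- the step for a non-bracket char while the cache is still shorter than 3
theorem step_short (ch : Char) (rest cache : List Char) (ins found : Bool)
    (hbr : ¬(ch = '[' ∨ ch = ']')) (hlen : cache.length < 3)
    (ih : ∀ f, loopA rest (cache ++ [ch]) ins f = specB rest (cache ++ [ch]) ins f) :
    loopA (ch :: rest) cache ins found = specB (ch :: rest) cache ins found := by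
  have hi : isAbba cache ch = false := by simp [isAbba]; omega
  have hpush : pushCache cache ch = cache ++ [ch] := by
    simp [pushCache]; intro h; omega
  rcases hsp : splitB rest with ⟨s, ss⟩
  rw [loopA, if_neg hbr, hi, hpush]
  cases ins
  · simp only [Bool.false_eq_true, if_false, Bool.and_false, ih]
    simp [specB, splitB, hbr, hsp, List.append_assoc]
  · simp only [if_true, Bool.false_eq_true, if_false, ih]
    simp [specB, splitB, hbr, hsp, List.append_assoc]

theorem loopA_eq_specB (cs : List Char) :
    ∀ cache ins found, cache.length ≤ 3 → loopA cs cache ins found = specB cs cache ins found := by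
  induction cs with
  | nil =>
    intro cache ins found hlen
    have h4 : hasAbba cache = false := hasAbba_short _ (by omega)
    simp [loopA, specB, splitB]
    cases ins <;> simp [evens, odds, h4]
  | cons ch rest ih =>
    intro cache ins found hlen
    by_cases hbr : ch = '[' ∨ ch = ']'
    · -- bracket: reset cache, toggle ins; split emits a new empty segment
      have h4 : hasAbba cache = false := hasAbba_short _ (by omega)
      rw [loopA, if_pos hbr, ih [] (!ins) found (by simp)]
      simp only [specB, splitB, if_pos hbr]
      cases ins <;> simp [evens, odds, h4]
    · match cache, hlen with
      | [], _ => exact step_short ch rest [] ins found hbr (by simp) (fun f => ih _ ins f (by simp))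
      | [a], _ => exact step_short ch rest [a] ins found hbr (by simp) (fun f => ih _ ins f (by simp))
      | [a, b], _ => exact step_short ch rest [a, b] ins found hbr (by simp) (fun f => ih _ ins f (by simp))
      | [a, b, c], _ =>
        rcases hsp : splitB rest with ⟨s, ss⟩
        have hiA : isAbba [a, b, c] ch = ((a == ch) && (b == c) && !(a == b)) := by
          by_cases h1 : a = ch <;> by_cases h2 : b = c <;> by_cases h3 : a = b <;>
            simp [isAbba, h1, h2, h3] <;> simp_all
        have hfirst : hasAbba (a :: b :: c :: ch :: s)
            = (((a == ch) && (b == c) && !(a == b)) || hasAbba (b :: c :: ch :: s)) := by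
          simp [hasAbba, bne]
        have hpush : pushCache [a, b, c] ch = [b, c, ch] := by simp [pushCache]
        rw [loopA, if_neg hbr, hiA, hpush]
        by_cases hab : ((a == ch) && (b == c) && !(a == b)) = true
        · rw [hab]
          cases ins
          · -- outside: found_outside becomes (or stays) true
            have hf : (if (!found && true) = true then true else found) = true := by
              cases found <;> simp
            rw [if_neg (by simp), hf, ih [b, c, ch] false true (by simp)]
            simp [specB, splitB, hbr, hsp, evens, odds, hfirst, hab]
          · -- inside: early return 0, and B sees the ABBA in an inside segment
            rw [if_pos rfl, if_pos rfl]
            simp [specB, splitB, hbr, hsp, evens, hfirst, hab]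
        · rw [Bool.not_eq_true] at hab
          have hw : hasAbba (a :: b :: c :: ch :: s) = hasAbba (b :: c :: ch :: s) := by
            rw [hfirst, hab]; simp
          rw [hab]
          cases ins
          · have hf : (if (!found && false) = true then true else found) = found := by
              cases found <;> simp
            rw [if_neg (by simp), hf, ih [b, c, ch] false found (by simp)]
            simp [specB, splitB, hbr, hsp, evens, odds, hw]
          · rw [if_pos rfl, if_neg (by simp), ih [b, c, ch] true found (by simp)]
            simp [specB, splitB, hbr, hsp, evens, odds, hw]

-- ===== VERDICT (by name: the statement is the Claim_ definition above) =====
theorem does_support_spec : Claim_equal_does_support := by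
  intro line _
  show does_support line = does_support_alt line
  rw [does_support, loopA_eq_specB _ _ _ _ (by simp)]
  simp [specB, does_support_alt]
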